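-- pv_equiv track=rewrite | github.com/SubhajitManna-B/Python-Program | Week_1_Assignment/Python_Programs_1/perfect or armstrong number.py | check_number_type
-- ===== SOURCE A (Python) =====
-- def check_number_type(num):
--     # Check if num is a perfect number
--     def is_perfect_number(num):
--         if num <= 0:
--             return False
--         sum_of_divisors = 0
--         for i in range(1, num):
--             if num % i == 0:
--                 sum_of_divisors += i
--         return sum_of_divisors == num
--
--     # Check if num is an Armstrong number
--     def is_armstrong_number(num):
--         if num <= 0:
--             return False
--         num_str = str(num)
--         num_digits = len(num_str)
--         sum_of_powers = sum(int(digit) ** num_digits for digit in num_str)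
--         return sum_of_powers == num
--
--     if is_perfect_number(num):
--         return f"{num} is a perfect number."
--     elif is_armstrong_number(num):
--         return f"{num} is an Armstrong number."
--     else:
--         return f"{num} is neither a perfect number nor an Armstrong number."
-- ===== SOURCE B (Python) =====
-- def check_number_type(num):
--     if num > 0:
--         # sum ALL divisors in O(sqrt(num)) via divisor pairs; perfect <=> sigma == 2*num
--         sigma = 0
--         i = 1
--         while i * i <= num:
--             if num % i == 0:
--                 sigma += i
--                 q = num // i
--                 if q != i:
--                     sigma += q
--             i += 1
--         if sigma == 2 * num:
--             return f"{num} is a perfect number."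
--         digits = str(num)
--         k = len(digits)
--         total = 0
--         for d in digits:
--             total += int(d) ** k
--         if total == num:
--             return f"{num} is an Armstrong number."
--     return f"{num} is neither a perfect number nor an Armstrong number."
-- ===== Notes on version B (the rewrite author's own statement) =====
-- stated objective: faster
-- what changed: The perfect-number test now sums all divisors by scanning divisor pairs (i, num//i) only up to sqrt(num) and compares that divisor sum with twice the input instead of scanning every i in range(1, num), and the Armstrong digit-power sum is folded with an explicit accumulator.
import Mathlib
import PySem

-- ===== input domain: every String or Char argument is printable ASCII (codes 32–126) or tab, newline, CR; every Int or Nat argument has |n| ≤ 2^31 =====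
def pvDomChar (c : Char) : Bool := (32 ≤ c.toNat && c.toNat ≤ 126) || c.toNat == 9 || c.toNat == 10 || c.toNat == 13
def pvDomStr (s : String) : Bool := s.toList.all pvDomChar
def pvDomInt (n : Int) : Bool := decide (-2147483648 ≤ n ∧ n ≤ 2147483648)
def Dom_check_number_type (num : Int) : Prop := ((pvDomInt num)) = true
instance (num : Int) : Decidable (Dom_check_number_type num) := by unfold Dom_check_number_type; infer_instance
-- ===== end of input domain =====

-- B replaces A's O(num) proper-divisor scan by the O(√num) divisor-pair sum (perfect ⇔ the full divisor sum equals twice num)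
-- and folds the Armstrong digit-power sum with an explicit accumulator; objective: faster (asymptotic).


-- ===== PORT A =====
def check_number_type (num : Int) : String :=
  -- is_perfect_number: sum of i in range(1, num) with num % i == 0, compared to num
  let is_perfect : Bool :=
    if num ≤ 0 then false
    else decide
      (((PySem.List.pyRange 1 num 1).foldl
          (fun s i => if PySem.Int.mod num i = 0 then s + i else s) 0) = num)
  -- is_armstrong_number: str(num), digit count, sum of int(digit) ** num_digits
  -- (int(digit) never raises here: every char of str(num) for num > 0 is a decimal digit)
  let is_armstrong : Bool :=
    if num ≤ 0 then false
    else
      let numStr := PySem.Int.toChars num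
      let numDigits := numStr.length
      decide ((numStr.map (fun c => ((PySem.Int.ofChars? [c]).getD 0) ^ numDigits)).sum = num)
  if is_perfect then PySem.Int.toStr num ++ " is a perfect number."
  else if is_armstrong then PySem.Int.toStr num ++ " is an Armstrong number."
  else PySem.Int.toStr num ++ " is neither a perfect number nor an Armstrong number."

-- ===== PORT B =====
-- the while-loop of Source B: i walks 1,2,… while i*i ≤ num, adding each divisor i and its cofactor num//i
def sigLoop (num i s : Int) : Int :=
  if _h : i * i ≤ num then
    sigLoop num (i + 1)
      (if PySem.Int.mod num i = 0 then
        (let q := PySem.Int.floordiv num i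
         if q ≠ i then s + i + q else s + i)
       else s)
  else s
termination_by (num + 1 - i).toNat
decreasing_by
  have hi : i ≤ num := by nlinarith [mul_self_nonneg (2 * i - 1)]
  omega

def check_number_type_alt (num : Int) : String :=
  if num > 0 then
    let sigma := sigLoop num 1 0
    if sigma = 2 * num then PySem.Int.toStr num ++ " is a perfect number."
    else
      let digits := PySem.Int.toChars num
      let k := digits.length
      let total := digits.foldl (fun t d => t + ((PySem.Int.ofChars? [d]).getD 0) ^ k) 0
      if total = num then PySem.Int.toStr num ++ " is an Armstrong number."
      else PySem.Int.toStr num ++ " is neither a perfect number nor an Armstrong number."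
  else PySem.Int.toStr num ++ " is neither a perfect number nor an Armstrong number."

-- ===== PRECONDITION & SPEC =====
def Spec_check_number_type (num : Int) (out : String) : Prop := out = check_number_type_alt num
instance (num : Int) (out : String) : Decidable (Spec_check_number_type num out) := by unfold Spec_check_number_type; infer_instance

-- ===== CLAIM (what is proved, stated in full; the proofs are below) =====
def Claim_equal_check_number_type : Prop := ∀ (num : Int), Dom_check_number_type num → Spec_check_number_type num (check_number_type num)

-- ===== LEMMAS AND PROOFS =====

-- A's accumulate-if loop is a sum of an indicator over the range
lemma foldl_ifadd (p : Int → Prop) [DecidablePred p] :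
    ∀ (l : List Int) (s : Int),
      l.foldl (fun s i => if p i then s + i else s) s
        = s + (l.map (fun i => if p i then i else 0)).sum := by
  intro l
  induction l with
  | nil => simp
  | cons x xs ih =>
    intro s
    simp only [List.foldl_cons, List.map_cons, List.sum_cons, ih]
    split_ifs <;> ring

-- the sum A computes, as a Finset sum over proper divisors
lemma aSum_eq (n : Nat) (hn : 0 < n) :
    ((PySem.List.pyRange 1 (n : Int) 1).foldl
        (fun s i => if PySem.Int.mod (n : Int) i = 0 then s + i else s) 0)
      = ((∑ d ∈ (n : Nat).properDivisors, d : Nat) : Int) := by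
  rw [foldl_ifadd, zero_add, PySem.List.pyRange_one]
  have h1 : ((n : Int) - 1).toNat = n - 1 := by omega
  rw [h1, List.map_map]
  have h2 : ∀ (m : Nat) (f : Nat → Int),
      ((List.range m).map f).sum = ∑ k ∈ Finset.range m, f k := by
    intro m f
    induction m with
    | zero => simp
    | succ m ih => rw [List.range_succ, Finset.sum_range_succ, List.map_append, List.sum_append, ih]; simp
  rw [h2]
  have h3 : ∀ k ∈ Finset.range (n - 1),
      ((fun i => if PySem.Int.mod (n:Int) i = 0 then i else 0) ∘ fun k : Nat => 1 + (k:Int)) k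
        = (((if (1 + k) ∣ n then (1 + k) else 0 : Nat)) : Int) := by
    intro k _
    simp only [Function.comp, PySem.Int.mod_eq_zero_iff_dvd]
    have : ((1 : Int) + (k : Int)) ∣ (n : Int) ↔ (1 + k) ∣ n := by
      constructor
      · intro h; exact_mod_cast h
      · intro h; exact_mod_cast h
    rw [if_congr this rfl rfl]
    split_ifs <;> push_cast <;> ring
  rw [Finset.sum_congr rfl h3, ← Nat.cast_sum]
  congr 1
  have h4 : n.properDivisors = Finset.filter (fun d => d ∣ n) (Finset.Ico 1 n) := rfl
  rw [h4, Finset.sum_filter, Finset.sum_Ico_eq_sum_range]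

-- divisor pairing: σ(n) as a sum over the divisors d with d·d ≤ n and their cofactors
lemma pair_sum (n : Nat) (hn : 0 < n) :
    ∑ d ∈ n.divisors, d
      = ∑ d ∈ n.divisors.filter (fun d => d * d ≤ n), (d + if d * d ≠ n then n / d else 0) := by
  have hsplit := Finset.sum_filter_add_sum_filter_not n.divisors (fun d => d * d ≤ n) (fun d => d)
  have hlarge :
      ∑ d ∈ n.divisors.filter (fun d => ¬ d * d ≤ n), d
        = ∑ d ∈ (n.divisors.filter (fun d => d * d ≤ n)).filter (fun d => d * d ≠ n), n / d := by
    apply Finset.sum_nbij' (fun d => n / d) (fun d => n / d)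
    · intro a ha
      simp only [Finset.mem_filter, Nat.mem_divisors, not_le] at ha ⊢
      obtain ⟨⟨hd, hn0⟩, hlt⟩ := ha
      have ha0 : 0 < a := Nat.pos_of_dvd_of_pos hd hn
      have he : n / a * a = n := Nat.div_mul_cancel hd
      have he0 : 0 < n / a := Nat.div_pos (Nat.le_of_dvd hn hd) ha0
      have hea : n / a < a := by nlinarith
      refine ⟨⟨⟨Nat.div_dvd_of_dvd hd, hn0⟩, by nlinarith⟩, by nlinarith⟩
    · intro a ha
      simp only [Finset.mem_filter, Nat.mem_divisors, not_le] at ha ⊢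
      obtain ⟨⟨⟨hd, hn0⟩, hle⟩, hne⟩ := ha
      have ha0 : 0 < a := Nat.pos_of_dvd_of_pos hd hn
      have he : n / a * a = n := Nat.div_mul_cancel hd
      have he0 : 0 < n / a := Nat.div_pos (Nat.le_of_dvd hn hd) ha0
      have hlt : a < n / a := by
        have hane : a ≠ n / a := fun h => hne (by nlinarith)
        rcases Nat.lt_or_ge a (n / a) with h | h
        · exact h
        · exfalso; exact hane (by nlinarith)
      exact ⟨⟨Nat.div_dvd_of_dvd hd, hn0⟩, by nlinarith⟩
    · intro a ha
      simp only [Finset.mem_filter, Nat.mem_divisors] at ha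
      exact Nat.div_div_self ha.1.1 ha.1.2
    · intro a ha
      simp only [Finset.mem_filter, Nat.mem_divisors] at ha
      exact Nat.div_div_self ha.1.1.1 ha.1.1.2
    · intro a ha
      simp only [Finset.mem_filter, Nat.mem_divisors] at ha
      exact (Nat.div_div_self ha.1.1 ha.1.2).symm
  calc ∑ d ∈ n.divisors, d
      = ∑ d ∈ n.divisors.filter (fun d => d * d ≤ n), d
        + ∑ d ∈ n.divisors.filter (fun d => ¬ d * d ≤ n), d := hsplit.symm
    _ = ∑ d ∈ n.divisors.filter (fun d => d * d ≤ n), d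
        + ∑ d ∈ n.divisors.filter (fun d => d * d ≤ n), (if d * d ≠ n then n / d else 0) := by
          rw [hlarge]; congr 1
          exact Finset.sum_filter (fun d => d * d ≠ n) (fun d => n / d)
    _ = ∑ d ∈ n.divisors.filter (fun d => d * d ≤ n), (d + if d * d ≠ n then n / d else 0) := by
          rw [← Finset.sum_add_distrib]

-- loop invariant for sigLoop: what remains to be added from position i on
lemma sigLoop_inv (n : Nat) (hn : 0 < n) :
    ∀ (m i : Nat) (s : Int), 1 ≤ i → n + 1 - i ≤ m →
      sigLoop (n : Int) (i : Int) s
        = s + ((∑ d ∈ n.divisors.filter (fun d => d * d ≤ n ∧ i ≤ d),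
                  (d + if d * d ≠ n then n / d else 0) : Nat) : Int) := by
  intro m
  induction m with
  | zero =>
    intro i s hi hm
    have hin : n + 1 ≤ i := by omega
    rw [sigLoop]
    have hguard : ¬ ((i : Int) * (i : Int) ≤ (n : Int)) := by
      have : n < i * i := by nlinarith
      exact_mod_cast not_le.mpr (by exact_mod_cast this)
    rw [dif_neg hguard]
    have hempty : n.divisors.filter (fun d => d * d ≤ n ∧ i ≤ d) = ∅ := by
      apply Finset.filter_eq_empty_iff.mpr
      intro d hd
      have := Nat.le_of_dvd hn (Nat.mem_divisors.mp hd).1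
      omega
    rw [hempty]; simp
  | succ m ih =>
    intro i s hi hm
    rw [sigLoop]
    by_cases hguard : (i : Int) * (i : Int) ≤ (n : Int)
    · rw [dif_pos hguard]
      have hii : i * i ≤ n := by exact_mod_cast hguard
      have hile : i ≤ n := le_trans (Nat.le_mul_of_pos_left i (by omega)) hii
      have hcast : ((i : Int) + 1) = ((i + 1 : Nat) : Int) := by push_cast; ring
      rw [hcast, ih (i + 1) _ (by omega) (by omega)]
      have hnotmem : i ∉ n.divisors.filter (fun d => d * d ≤ n ∧ i + 1 ≤ d) := by
        simp [Finset.mem_filter]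
      by_cases hdvd : i ∣ n
      · have hmod : PySem.Int.mod (n : Int) (i : Int) = 0 :=
          (PySem.Int.mod_eq_zero_iff_dvd _ _).mpr (by exact_mod_cast hdvd)
        rw [if_pos hmod]
        have hset : n.divisors.filter (fun d => d * d ≤ n ∧ i ≤ d)
            = insert i (n.divisors.filter (fun d => d * d ≤ n ∧ i + 1 ≤ d)) := by
          ext d
          simp only [Finset.mem_filter, Finset.mem_insert, Nat.mem_divisors]
          constructor
          · rintro ⟨hd, hle, hge⟩
            rcases Nat.eq_or_lt_of_le hge with h | h
            · exact Or.inl h.symm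
            · exact Or.inr ⟨hd, hle, by omega⟩
          · rintro (rfl | ⟨hd, hle, hge⟩)
            · exact ⟨⟨hdvd, by omega⟩, hii, le_refl _⟩
            · exact ⟨hd, hle, by omega⟩
        rw [hset, Finset.sum_insert hnotmem]
        have hq : PySem.Int.floordiv (n : Int) (i : Int) = ((n / i : Nat) : Int) :=
          PySem.Int.floordiv_natCast n i
        have hiq : i * (n / i) = n := Nat.mul_div_cancel' hdvd
        by_cases hne : n / i = i
        · have hsq : i * i = n := by rw [hne] at hiq; exact hiq
          rw [hq]
          rw [if_neg (by rw [hne]; simp)]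
          rw [if_neg (by omega)]
          push_cast
          ring
        · rw [hq, if_pos (by exact_mod_cast fun h => hne (by exact_mod_cast h))]
          have hsq : i * i ≠ n := by
            intro h
            apply hne
            nlinarith
          rw [if_pos hsq]
          push_cast
          ring
      · have hmod : ¬ PySem.Int.mod (n : Int) (i : Int) = 0 := by
          rw [PySem.Int.mod_eq_zero_iff_dvd]
          intro h
          exact hdvd (by exact_mod_cast h)
        rw [if_neg hmod]
        have hset : n.divisors.filter (fun d => d * d ≤ n ∧ i ≤ d)
            = n.divisors.filter (fun d => d * d ≤ n ∧ i + 1 ≤ d) := by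
          ext d
          simp only [Finset.mem_filter, Nat.mem_divisors]
          constructor
          · rintro ⟨hd, hle, hge⟩
            refine ⟨hd, hle, ?_⟩
            rcases Nat.eq_or_lt_of_le hge with h | h
            · exact absurd (h ▸ hd.1) hdvd
            · omega
          · rintro ⟨hd, hle, hge⟩; exact ⟨hd, hle, by omega⟩
        rw [hset]
    · rw [dif_neg hguard]
      have hii : ¬ (i * i ≤ n) := by
        intro h; exact hguard (by exact_mod_cast h)
      have hempty : n.divisors.filter (fun d => d * d ≤ n ∧ i ≤ d) = ∅ := by
        apply Finset.filter_eq_empty_iff.mpr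
        intro d hd h
        have hd1 : 1 ≤ d := Nat.pos_of_dvd_of_pos (Nat.mem_divisors.mp hd).1 hn
        have : i * i ≤ d * d := Nat.mul_le_mul h.2 h.2
        omega
      rw [hempty]; simp

-- B's pair loop computes σ(n)
lemma sigLoop_eq (n : Nat) (hn : 0 < n) :
    sigLoop (n : Int) 1 0 = ((∑ d ∈ n.divisors, d : Nat) : Int) := by
  have h := sigLoop_inv n hn (n + 1) 1 0 (le_refl 1) (by omega)
  have h1 : ((1 : Nat) : Int) = (1 : Int) := rfl
  rw [h1] at h
  rw [h, zero_add, pair_sum n hn]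
  congr 1
  apply Finset.sum_congr _ (fun _ _ => rfl)
  apply Finset.filter_congr
  intro d hd
  have := Nat.pos_of_dvd_of_pos (Nat.mem_divisors.mp hd).1 hn
  omega

-- ===== VERDICT (by name: the statement is the Claim_ definition above) =====
theorem check_number_type_spec : Claim_equal_check_number_type := by
  intro num _
  unfold Spec_check_number_type check_number_type check_number_type_alt
  by_cases hpos : num > 0
  · lift num to Nat using le_of_lt hpos with n
    have hn : 0 < n := by exact_mod_cast hpos
    simp only [if_pos hpos, if_neg (show ¬ ((n : Int) ≤ 0) by exact_mod_cast not_le.mpr hn)]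
    -- perfect conditions agree
    have hps := Nat.sum_divisors_eq_sum_properDivisors_add_self (n := n)
    have hperf : (((PySem.List.pyRange 1 (n:Int) 1).foldl
          (fun s i => if PySem.Int.mod (n:Int) i = 0 then s + i else s) 0) = (n:Int))
        ↔ (sigLoop (n:Int) 1 0 = 2 * (n:Int)) := by
      rw [aSum_eq n hn, sigLoop_eq n hn]
      constructor
      · intro h
        have h' : (∑ d ∈ n.properDivisors, d) = n := by exact_mod_cast h
        have : (∑ d ∈ n.divisors, d) = 2 * n := by omega
        exact_mod_cast this
      · intro h
        have h' : (∑ d ∈ n.divisors, d) = 2 * n := by exact_mod_cast h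
        have : (∑ d ∈ n.properDivisors, d) = n := by omega
        exact_mod_cast this
    -- armstrong sums agree
    have harm : ((PySem.Int.toChars (n:Int)).foldl
          (fun t d => t + ((PySem.Int.ofChars? [d]).getD 0) ^ (PySem.Int.toChars (n:Int)).length) 0)
        = ((PySem.Int.toChars (n:Int)).map
          (fun c => ((PySem.Int.ofChars? [c]).getD 0) ^ (PySem.Int.toChars (n:Int)).length)).sum := by
      rw [PySem.List.foldl_add, zero_add]
    by_cases hp : sigLoop (n:Int) 1 0 = 2 * (n:Int)
    · simp only [if_pos hp, if_pos (decide_eq_true (hperf.mpr hp))]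
    · simp only [if_neg hp, decide_eq_false (fun h => hp (hperf.mp h)), Bool.false_eq_true,
        if_false, harm]
      by_cases ha : ((PySem.Int.toChars (n:Int)).map
          (fun c => ((PySem.Int.ofChars? [c]).getD 0) ^ (PySem.Int.toChars (n:Int)).length)).sum = (n:Int)
      · simp only [if_pos ha, decide_eq_true ha, if_true]
      · simp only [if_neg ha, decide_eq_false ha, Bool.false_eq_true, if_false]
  · have hle : num ≤ 0 := by omega
    simp [hpos, hle]
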